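-- pv_equiv track=rewrite | github.com/Derlinjer/Is-number-decimal | isDecimal.py | find_period_without_not_period_part
-- ===== SOURCE A (Python) =====
-- def find_period_without_not_period_part(part_after_point_a):
-- 	i = 0
-- 	a_string = part_after_point_a
-- 	while not(find_period(a_string)) and i < len(part_after_point_a):
-- 		i += 1
-- 		a_string = part_after_point_a[i: len(part_after_point_a)]
-- 	if i < len(part_after_point_a):
-- 		return [part_after_point_a[:i], find_period(a_string)]
-- 	return None
--
-- def slice_by_N(fractional_part, length_substring):
-- 	array = []
-- 	j = len(fractional_part) // length_substring
-- 	for i in range(1, j + 1):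
-- 	 	z = fractional_part[(i * length_substring) - length_substring: i * length_substring]
-- 	 	array.append(z)
-- 	return array
--
-- def is_substring_same_in_array(sub_string_array):
-- 	for i in range(1, len(sub_string_array)):
-- 		if sub_string_array[0] != sub_string_array[i]:
-- 			return False
-- 	return True
--
-- def find_denominator(a):
-- 	array = []
-- 	i = a - 1
-- 	while i > 0:
-- 		if  a % i == 0:
-- 			array.append(i)
-- 		i -= 1
-- 	return array
--
-- def find_period(strin):
-- 	denominators = find_denominator(len(strin))
-- 	stroka = []
-- 	for i in range(len(denominators)):
-- 		if is_substring_same_in_array(slice_by_N(strin, denominators[i])):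
-- 			stroka.append(slice_by_N(strin, denominators[i])[0])
-- 	return stroka[-1] if len(stroka) > 0 else ''
-- ===== SOURCE B (Python) =====
-- def find_period_without_not_period_part(part_after_point_a):
--     s = part_after_point_a
--     n = len(s)
--     for i in range(n):
--         t = s[i:]
--         m = n - i
--         for d in range(1, m):
--             if m % d == 0 and t == t[:d] * (m // d):
--                 return [s[:i], t[:d]]
--     return None
-- ===== Notes on version B (the rewrite author's own statement) =====
-- stated objective: faster
-- what changed: B replaces the divisor-collecting machinery (enumerate all proper divisors in decreasing order, slice the string into blocks for each, compare all blocks, collect every matching period and take the last) with a direct scan: for each suffix, try divisors in increasing order and return the first d whose d-prefix repeated fills the suffix, exiting early.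
import Mathlib
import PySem

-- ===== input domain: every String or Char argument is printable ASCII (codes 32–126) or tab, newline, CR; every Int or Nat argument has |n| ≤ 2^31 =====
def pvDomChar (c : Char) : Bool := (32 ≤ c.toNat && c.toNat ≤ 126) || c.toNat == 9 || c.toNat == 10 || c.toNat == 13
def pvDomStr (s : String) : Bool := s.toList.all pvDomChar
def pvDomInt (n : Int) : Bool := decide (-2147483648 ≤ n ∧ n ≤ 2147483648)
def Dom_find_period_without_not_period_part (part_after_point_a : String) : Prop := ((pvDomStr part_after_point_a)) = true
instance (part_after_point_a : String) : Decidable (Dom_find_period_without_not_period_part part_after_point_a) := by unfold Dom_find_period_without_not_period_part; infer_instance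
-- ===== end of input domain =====

-- B replaces A's divisor-collecting period search (all proper divisors, decreasing, block
-- slicing and comparison for each, keep every match and take the last) with a single increasing
-- scan per suffix that returns at the first divisor whose prefix repetition rebuilds the suffix.
-- ===== PORT A =====
-- A-side helpers (literal transliterations of the module's helper functions)
def pvFindDenomGo (a i : Int) (array : List Int) : List Int :=
  if 0 < i then
    pvFindDenomGo a (i - 1) (if PySem.Int.mod a i == 0 then array ++ [i] else array)
  else array
termination_by i.toNat
decreasing_by omega

def pvFindDenom (a : Int) : List Int := pvFindDenomGo a (a - 1) []

def pvSliceByN (fractional_part : List Char) (length_substring : Int) : List (List Char) :=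
  let j : Int := PySem.Int.floordiv (fractional_part.length : Int) length_substring
  (PySem.List.pyRange 1 (j + 1) 1).foldl
    (fun array i =>
      array ++ [PySem.List.slice fractional_part (some (i * length_substring - length_substring))
                  (some (i * length_substring))]) []

def pvIsSameGo (arr : List (List Char)) : List Int → Bool
  | [] => true
  | i :: rest =>
      if PySem.List.pyGetD arr 0 [] != PySem.List.pyGetD arr i [] then false
      else pvIsSameGo arr rest

def pvIsSame (sub_string_array : List (List Char)) : Bool :=
  pvIsSameGo sub_string_array (PySem.List.pyRange 1 (sub_string_array.length : Int) 1)

def pvFindPeriod (strin : List Char) : List Char :=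
  let denominators := pvFindDenom (strin.length : Int)
  let stroka := (PySem.List.pyRange 0 (denominators.length : Int) 1).foldl
    (fun stroka i =>
      if pvIsSame (pvSliceByN strin (PySem.List.pyGetD denominators i 0)) then
        stroka ++ [PySem.List.pyGetD (pvSliceByN strin (PySem.List.pyGetD denominators i 0)) 0 []]
      else stroka) []
  if stroka.length > 0 then PySem.List.pyGetD stroka (-1) [] else []

-- the while loop of A: i, a_string evolve until find_period truthy or i = len
def pvAGo (s : List Char) (i : Int) (a_string : List Char) : Int × List Char :=
  if h : (pvFindPeriod a_string).isEmpty && i < (s.length : Int) then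
    pvAGo s (i + 1) (PySem.List.slice s (some (i + 1)) (some (s.length : Int)))
  else (i, a_string)
termination_by ((s.length : Int) - i).toNat
decreasing_by simp at h; omega

def find_period_without_not_period_part (part_after_point_a : String) : Option (List String) :=
  let s := part_after_point_a.toList
  let p := pvAGo s 0 s
  if p.1 < (s.length : Int) then
    some [String.ofList (PySem.List.slice s none (some p.1)),
          String.ofList (pvFindPeriod p.2)]
  else none

-- ===== PORT B =====
-- B-side helpers (transliteration of Source B)
def altCheck (t : List Char) (m d : Nat) : Bool :=
  m % d == 0 && t == (List.replicate (m / d) (t.take d)).flatten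

def altInner (t : List Char) (m : Nat) : List Nat → Option (List Char)
  | [] => none
  | d :: ds => if altCheck t m d then some (t.take d) else altInner t m ds

def altOuter (s : List Char) : List Nat → Option (List String)
  | [] => none
  | i :: is =>
      match altInner (s.drop i) (s.length - i) (((List.range (s.length - i - 1)).map (· + 1))) with
      | some p => some [String.ofList (s.take i), String.ofList p]
      | none => altOuter s is

def find_period_without_not_period_part_alt (part_after_point_a : String) : Option (List String) :=
  altOuter part_after_point_a.toList (List.range part_after_point_a.toList.length)

-- ===== PRECONDITION & SPEC =====
def Spec_find_period_without_not_period_part (part_after_point_a : String) (out : Option (List String)) : Prop := out = find_period_without_not_period_part_alt part_after_point_a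
instance (part_after_point_a : String) (out : Option (List String)) : Decidable (Spec_find_period_without_not_period_part part_after_point_a out) := by unfold Spec_find_period_without_not_period_part; infer_instance

-- ===== CLAIM (what is proved, stated in full; the proofs are below) =====
def Claim_equal_find_period_without_not_period_part : Prop := ∀ (part_after_point_a : String), Dom_find_period_without_not_period_part part_after_point_a → Spec_find_period_without_not_period_part part_after_point_a (find_period_without_not_period_part part_after_point_a)

-- ===== LEMMAS AND PROOFS =====
lemma lem_findDenomGo (a i : Int) (acc : List Int) :
    pvFindDenomGo a i acc = acc ++ (PySem.List.pyRange i 0 (-1)).filter (fun d => PySem.Int.mod a d == 0) := by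
  fun_induction pvFindDenomGo a i acc with
  | case1 i acc h ih =>
      simp only [dite_eq_ite] at ih
      rw [ih, PySem.List.pyRange_neg_one_cons h, List.filter_cons]
      split <;> simp_all
  | case2 i acc h =>
      rw [PySem.List.pyRange_neg_one_eq_nil (by omega)]; simp

lemma lem_findDenom (m : Nat) :
    pvFindDenom (m : Int) =
      ((PySem.List.pyRange 1 (m : Int) 1).filter (fun d => PySem.Int.mod (m : Int) d == 0)).reverse := by
  unfold pvFindDenom
  rw [lem_findDenomGo, PySem.List.pyRange_neg_one_eq_reverse]
  simp [List.filter_reverse]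

lemma lem_sliceByN (t : List Char) (d : Nat) :
    pvSliceByN t (d : Int) = (List.range (t.length / d)).map (fun k => (t.drop (k * d)).take d) := by
  unfold pvSliceByN
  rw [PySem.Int.floordiv_natCast, PySem.List.foldl_append_singleton_eq_map, PySem.List.pyRange_one]
  simp only [List.nil_append, List.map_map]
  rw [show (((t.length / d : Nat) : Int) + 1 - 1).toNat = t.length / d by generalize (t.length / d : Nat) = q; omega]
  apply List.map_congr_left
  intro k hk
  simp only [Function.comp]
  have h1 : (1 + (k : Int)) * (d : Int) - (d : Int) = ((k * d : Nat) : Int) := by push_cast; ring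
  have h2 : (1 + (k : Int)) * (d : Int) = ((k * d : Nat) : Int) + ((d : Nat) : Int) := by push_cast; ring
  rw [h1, h2, PySem.List.slice_natCast_add]

lemma lem_isSameGo (arr : List (List Char)) : ∀ (is : List Int),
    pvIsSameGo arr is = is.all (fun i => PySem.List.pyGetD arr 0 [] == PySem.List.pyGetD arr i []) := by
  intro is
  induction is with
  | nil => simp [pvIsSameGo]
  | cons i rest ih =>
      simp only [pvIsSameGo, List.all_cons, ih, bne]
      cases h : (PySem.List.pyGetD arr 0 [] == PySem.List.pyGetD arr i []) <;> simp

lemma lem_isSame_map (g : Nat → List Char) (q : Nat) :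
    pvIsSame ((List.range q).map g) = true ↔ ∀ k, k < q → g k = g 0 := by
  unfold pvIsSame
  rw [lem_isSameGo]
  simp only [List.all_eq_true]
  constructor
  · intro h k hk
    rcases Nat.eq_zero_or_pos k with rfl | hk0
    · rfl
    · have hmem : (k : Int) ∈ PySem.List.pyRange 1 (((List.range q).map g).length : Int) 1 := by
        rw [PySem.List.mem_pyRange_one]; simp; omega
      have := h _ hmem
      rw [PySem.List.pyGetD_natCast, show (0 : Int) = ((0 : Nat) : Int) by simp, PySem.List.pyGetD_natCast] at this
      rw [PySem.List.getD_map_range g q k [] hk, PySem.List.getD_map_range g q 0 [] (by omega)] at this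
      exact (beq_iff_eq.mp this).symm
  · intro h i hi
    rw [PySem.List.mem_pyRange_one] at hi
    simp only [List.length_map, List.length_range] at hi
    have hi' : i = ((i.toNat : Nat) : Int) := by omega
    rw [hi', PySem.List.pyGetD_natCast, show (0 : Int) = ((0 : Nat) : Int) by simp, PySem.List.pyGetD_natCast]
    have hq : 0 < q := by omega
    rw [PySem.List.getD_map_range g q 0 [] hq, PySem.List.getD_map_range g q i.toNat [] (by omega)]
    simp [h i.toNat (by omega)]

lemma lem_drop_flatten_replicate (c : List Char) (d : Nat) (hc : c.length = d) :
    ∀ (k q : Nat), k ≤ q → ((List.replicate q c).flatten).drop (k * d) = (List.replicate (q - k) c).flatten := by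
  intro k
  induction k with
  | zero => simp
  | succ k ih =>
      intro q hkq
      cases q with
      | zero => omega
      | succ q =>
          have : (k + 1) * d = d + k * d := by ring
          rw [this, ← List.drop_drop, List.replicate_succ, List.flatten_cons,
            List.drop_left' hc, ih q (by omega)]
          rw [show q + 1 - (k + 1) = q - k from by omega]

lemma lem_take_flatten_replicate (c : List Char) (d : Nat) (hc : c.length = d) (q : Nat) (hq : 0 < q) :
    ((List.replicate q c).flatten).take d = c := by
  cases q with
  | zero => omega
  | succ q => rw [List.replicate_succ, List.flatten_cons, List.take_left' hc]

lemma lem_rep_iff (d : Nat) (_hd : 0 < d) : ∀ (q : Nat) (t : List Char), t.length = q * d →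
    ((∀ k, k < q → (t.drop (k * d)).take d = t.take d) ↔ t = (List.replicate q (t.take d)).flatten) := by
  intro q
  induction q with
  | zero =>
      intro t hlen
      simp at hlen ⊢
      exact hlen
  | succ q ih =>
      intro t hlen
      have hdt : d ≤ t.length := by rw [hlen]; exact Nat.le_mul_of_pos_left d (Nat.succ_pos q)
      have htake : (t.take d).length = d := by rw [List.length_take]; omega
      have hsplit : t = t.take d ++ t.drop d := (List.take_append_drop d t).symm
      constructor
      · intro h
        rcases Nat.eq_zero_or_pos q with rfl | hq
        · simp
          omega
        · -- r := t.drop d satisfies all-blocks-equal with value t.take d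
          have hr : ∀ k, k < q → ((t.drop d).drop (k * d)).take d = (t.drop d).take d := by
            intro k hk
            have e1 : (t.drop d).drop (k * d) = t.drop ((k+1) * d) := by
              rw [List.drop_drop]; congr 1; ring
            have e2 : (t.drop d).take d = (t.drop (1 * d)).take d := by norm_num
            rw [e1, e2, h (k+1) (by omega), h 1 (by omega)]
          have hrep := (ih (t.drop d) (by rw [List.length_drop, hlen, Nat.succ_mul]; omega)).mp hr
          have hrt : (t.drop d).take d = t.take d := by
            have := h 1 (by omega); simpa using this
          rw [List.replicate_succ, List.flatten_cons]
          calc t = t.take d ++ t.drop d := hsplit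
          _ = t.take d ++ (List.replicate q ((t.drop d).take d)).flatten := by rw [← hrep]
          _ = t.take d ++ (List.replicate q (t.take d)).flatten := by rw [hrt]
      · intro h k hk
        conv_lhs => rw [h]
        rw [lem_drop_flatten_replicate (t.take d) d htake k (q+1) (by omega),
          lem_take_flatten_replicate (t.take d) d htake (q+1-k) (by omega)]

lemma lem_pyGetD_neg_one {α : Type} (l : List α) (d : α) :
    PySem.List.pyGetD l (-1) d = l.getLastD d := by
  simp [PySem.List.pyGetD, PySem.List.pyGet?, PySem.List.pyIdx?]
  rcases l.eq_nil_or_concat with rfl | ⟨ys, y, rfl⟩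
  · simp
  · simp

lemma lem_altInner (t : List Char) (m : Nat) : ∀ (ds : List Nat),
    altInner t m ds = ((ds.filter (altCheck t m)).head?).map (fun d => t.take d) := by
  intro ds
  induction ds with
  | nil => simp [altInner]
  | cons d rest ih =>
      simp only [altInner, List.filter_cons]
      by_cases h : altCheck t m d <;> simp [h, ih]

lemma lem_point (t : List Char) (k : Nat) :
    (pvIsSame (pvSliceByN t (1 + (k : Int))) && (PySem.Int.mod (t.length : Int) (1 + (k : Int)) == 0))
      = altCheck t t.length (k + 1) := by
  rw [show (1 + (k : Int)) = ((k + 1 : Nat) : Int) from by push_cast; ring,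
    PySem.Int.mod_natCast, lem_sliceByN t (k + 1)]
  by_cases hdvd : t.length % (k + 1) = 0
  · have hd : 0 < k + 1 := Nat.succ_pos k
    have hlen : t.length = (t.length / (k + 1)) * (k + 1) :=
      (Nat.div_mul_cancel (Nat.dvd_of_mod_eq_zero hdvd)).symm
    rw [Bool.eq_iff_iff]
    simp only [altCheck, hdvd, Bool.and_eq_true, beq_iff_eq, Nat.cast_zero]
    rw [lem_isSame_map]
    simp only [Nat.zero_mul, List.drop_zero]
    rw [lem_rep_iff (k + 1) hd (t.length / (k + 1)) t hlen]
    simp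
  · have h1 : (((t.length % (k + 1) : Nat) : Int) == 0) = false := by
      simp only [beq_eq_false_iff_ne, ne_eq, Nat.cast_eq_zero]
      exact hdvd
    have h2 : (t.length % (k + 1) == 0) = false := by simp [hdvd]
    simp only [altCheck]
    rw [h1, h2]
    simp

lemma lem_bh (t : List Char) (k : Nat) (hk : k < t.length - 1) :
    PySem.List.pyGetD (pvSliceByN t (1 + (k : Int))) 0 [] = t.take (k + 1) := by
  rw [show (1 + (k : Int)) = ((k + 1 : Nat) : Int) from by push_cast; ring, lem_sliceByN t (k + 1),
    show (0 : Int) = ((0 : Nat) : Int) from by simp, PySem.List.pyGetD_natCast]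
  have hq : 0 < t.length / (k + 1) := Nat.div_pos (by omega) (Nat.succ_pos k)
  rw [PySem.List.getD_map_range _ _ 0 [] hq]
  simp

lemma lem_stroka (t : List Char) (D : List Int) :
    (List.foldl (fun stroka i =>
        if pvIsSame (pvSliceByN t (PySem.List.pyGetD D i 0)) then
          stroka ++ [PySem.List.pyGetD (pvSliceByN t (PySem.List.pyGetD D i 0)) 0 []]
        else stroka) [] (PySem.List.pyRange 0 (D.length : Int) 1))
      = (D.filter (fun dd => pvIsSame (pvSliceByN t dd))).map
          (fun dd => PySem.List.pyGetD (pvSliceByN t dd) 0 []) := by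
  rw [PySem.List.foldl_pyRange_zero_pyGetD' D 0
    (fun stroka dd => if pvIsSame (pvSliceByN t dd) then
      stroka ++ [PySem.List.pyGetD (pvSliceByN t dd) 0 []] else stroka) []]
  rw [PySem.List.foldl_append_if]
  simp

lemma lem_findPeriod (t : List Char) :
    pvFindPeriod t =
      (match ((List.range (t.length - 1)).filter (fun k => altCheck t t.length (k + 1))).head? with
       | some k => t.take (k + 1)
       | none => []) := by
  simp only [pvFindPeriod]
  rw [lem_findDenom t.length, lem_stroka, List.filter_reverse, List.map_reverse, lem_pyGetD_neg_one,
    List.getLastD_eq_getLast?, List.getLast?_reverse, List.filter_filter,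
    PySem.List.pyRange_one, show ((t.length : Int) - 1).toNat = t.length - 1 from by omega,
    List.filter_map]
  simp only [Function.comp_def]
  rw [List.filter_congr (fun k _ => lem_point t k), List.map_map]
  cases hLf : (List.range (t.length - 1)).filter (fun k => altCheck t t.length (k + 1)) with
  | nil => simp
  | cons k tl =>
      have hmem : k ∈ (List.range (t.length - 1)).filter (fun k => altCheck t t.length (k + 1)) := by
        rw [hLf]; exact List.mem_cons_self
      have hk : k < t.length - 1 := List.mem_range.mp (List.mem_filter.mp hmem).1
      simp only [List.map_cons, List.head?_cons, List.reverse_cons, List.length_append]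
      simp only [Function.comp_def, Option.getD_some]
      have := lem_bh t k hk
      simp [this]

lemma lem_altB (t : List Char) (m : Nat) :
    altInner t m ((List.range (m - 1)).map (· + 1)) =
      (((List.range (m - 1)).filter (fun k => altCheck t m (k + 1))).head?).map (fun k => t.take (k + 1)) := by
  rw [lem_altInner, List.filter_map]
  simp only [Function.comp_def, List.head?_map, Option.map_map]

lemma lem_outer (s : List Char) : ∀ (fuel i : Nat), s.length - i = fuel → i ≤ s.length →
    (if (pvAGo s (i : Int) (s.drop i)).1 < (s.length : Int) then
       some [String.ofList (PySem.List.slice s none (some (pvAGo s (i : Int) (s.drop i)).1)),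
             String.ofList (pvFindPeriod (pvAGo s (i : Int) (s.drop i)).2)]
     else none)
    = altOuter s (List.range' i fuel) := by
  intro fuel
  induction fuel with
  | zero =>
      intro i h hle
      have hi : i = s.length := by omega
      rw [pvAGo]
      have hdrop : s.drop i = [] := by simp [hi]
      simp [hi, altOuter]
  | succ n ih =>
      intro i h hle
      have hi : i < s.length := by omega
      have hlen : (s.drop i).length = s.length - i := by simp
      have hne : s.drop i ≠ [] := by
        intro hcon
        have := congrArg List.length hcon
        simp at this; omega
      rw [List.range'_succ, altOuter]
      rw [lem_altB (s.drop i) (s.length - i)]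
      have hpred : (fun k => altCheck (s.drop i) (s.length - i) (k + 1))
          = (fun k => altCheck (s.drop i) (s.drop i).length (k + 1)) := by rw [hlen]
      rw [hpred, show s.length - i - 1 = (s.drop i).length - 1 from by rw [hlen]]
      cases hH : ((List.range ((s.drop i).length - 1)).filter
          (fun k => altCheck (s.drop i) (s.drop i).length (k + 1))).head? with
      | some k =>
          have hp : pvFindPeriod (s.drop i) = (s.drop i).take (k + 1) := by
            rw [lem_findPeriod, hH]
          have hpne : (pvFindPeriod (s.drop i)).isEmpty = false := by
            rw [hp]
            simp [List.take_eq_nil_iff, hne]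
          rw [pvAGo]
          simp only [hpne, Bool.false_and]
          rw [dif_neg (by simp)]
          simp only [Option.map_some]
          rw [if_pos (by simpa using (show (i : Int) < (s.length : Int) from by exact_mod_cast hi))]
          rw [PySem.List.slice_to_natCast, hp]
      | none =>
          have hp : pvFindPeriod (s.drop i) = [] := by rw [lem_findPeriod, hH]
          have hpe : (pvFindPeriod (s.drop i)).isEmpty = true := by simp [hp]
          rw [pvAGo]
          simp only [hpe, Bool.true_and]
          rw [dif_pos (by simp; exact_mod_cast hi)]
          have hslice : PySem.List.slice s (some ((i : Int) + 1)) (some (s.length : Int))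
              = s.drop (i + 1) := by
            rw [show ((i : Int) + 1) = ((i + 1 : Nat) : Int) from by push_cast; ring,
              PySem.List.slice_natCast]
            rw [show ((s.length : Nat) - (i + 1)) = (s.drop (i + 1)).length from by simp]
            exact List.take_length ..
          rw [hslice, show ((i : Int) + 1) = ((i + 1 : Nat) : Int) from by push_cast; ring]
          exact ih (i + 1) (by omega) (by omega)

lemma lem_main (p : String) :
    find_period_without_not_period_part p = find_period_without_not_period_part_alt p := by
  unfold find_period_without_not_period_part find_period_without_not_period_part_alt
  have h0 : (p.toList.drop 0) = p.toList := List.drop_zero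
  have := lem_outer p.toList p.toList.length 0 (by omega) (by omega)
  rw [h0] at this
  rw [show ((0 : Nat) : Int) = (0 : Int) from by simp] at this
  rw [this, List.range_eq_range']


-- ===== VERDICT (by name: the statement is the Claim_ definition above) =====
theorem find_period_without_not_period_part_spec : Claim_equal_find_period_without_not_period_part := by
  intro p _
  exact lem_main p
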